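-- pv_equiv track=rewrite | github.com/ceramic-vessel-developer/AdventOfCode2023 | Day_3/puzzle_1.py | check_if_part
-- ===== SOURCE A (Python) =====
-- def check_if_part(main_index, indexes, matrix):
--     is_part = False
--     for i in indexes:
--         if not (('0' <= matrix[main_index - 1][i] <= '9') or matrix[main_index - 1][i] == '.') and main_index > 0:
--             is_part = True
--         elif not (('0' <= matrix[main_index - 1][i - 1] <= '9') or matrix[main_index - 1][
--             i - 1] == '.') and main_index > 0 and i > 0:
--             is_part = True
--         elif not (('0' <= matrix[main_index][i - 1] <= '9') or matrix[main_index][i - 1] == '.') and i > 0: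
--             is_part = True
--
--         if i < len(matrix[0]) - 1:
--             if not (('0' <= matrix[main_index - 1][i + 1] <= '9') or matrix[main_index - 1][i + 1] == '.') and main_index > 0:
--                 is_part = True
--             elif not (('0' <= matrix[main_index][i + 1] <= '9') or matrix[main_index][i + 1] == '.'):
--                 is_part = True
--         if main_index < len(matrix) - 1:
--             if not (('0' <= matrix[main_index + 1][i] <= '9') or matrix[main_index + 1][i] == '.'):
--                 is_part = True
--             elif not (('0' <= matrix[main_index + 1][i - 1] <= '9') or matrix[main_index + 1][i - 1] == '.') and i > 0:
--                 is_part = True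
--             if i < len(matrix[0]) - 1:
--                 if not (('0' <= matrix[main_index + 1][i + 1] <= '9') or matrix[main_index + 1][i + 1] == '.'):
--                     is_part = True
--     return is_part
-- ===== SOURCE B (Python) =====
-- def check_if_part(main_index, indexes, matrix):
--     # Build the column lists once, then scan row-by-row (above / own / below)
--     # instead of testing 8 guarded neighbours per digit cell.
--     if not indexes:
--         return False
--     n_rows = len(matrix)
--     n_cols = len(matrix[0])
--
--     def symbol(cell):
--         return not ('0' <= cell <= '9' or cell == '.')
--
--     around = []  # columns to scan in the row above and the row below
--     beside = []  # columns to scan in the number's own row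
--     for i in indexes:
--         around.append(i)
--         if i > 0:
--             around.append(i - 1)
--             beside.append(i - 1)
--         if i < n_cols - 1:
--             around.append(i + 1)
--             beside.append(i + 1)
--
--     if main_index > 0 and any(symbol(matrix[main_index - 1][c]) for c in around):
--         return True
--     if any(symbol(matrix[main_index][c]) for c in beside):
--         return True
--     return main_index < n_rows - 1 and any(symbol(matrix[main_index + 1][c]) for c in around)
-- ===== Notes on version B (the rewrite author's own statement) =====
-- stated objective: alternative
-- what changed: B collects the neighbour-column lists once in a single pass over indexes and then scans the three relevant rows (above / own / below) with early exits, instead of A's 8 guarded neighbour tests inside every loop iteration accumulated into a flag.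
-- outside the precondition, e.g. on check_if_part(0, [0], [['1'], ['*', '#']]): A returns True, B returns True; on check_if_part(2, [0], [['.'], ['*']]): A returns True, B returns True
import Mathlib
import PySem

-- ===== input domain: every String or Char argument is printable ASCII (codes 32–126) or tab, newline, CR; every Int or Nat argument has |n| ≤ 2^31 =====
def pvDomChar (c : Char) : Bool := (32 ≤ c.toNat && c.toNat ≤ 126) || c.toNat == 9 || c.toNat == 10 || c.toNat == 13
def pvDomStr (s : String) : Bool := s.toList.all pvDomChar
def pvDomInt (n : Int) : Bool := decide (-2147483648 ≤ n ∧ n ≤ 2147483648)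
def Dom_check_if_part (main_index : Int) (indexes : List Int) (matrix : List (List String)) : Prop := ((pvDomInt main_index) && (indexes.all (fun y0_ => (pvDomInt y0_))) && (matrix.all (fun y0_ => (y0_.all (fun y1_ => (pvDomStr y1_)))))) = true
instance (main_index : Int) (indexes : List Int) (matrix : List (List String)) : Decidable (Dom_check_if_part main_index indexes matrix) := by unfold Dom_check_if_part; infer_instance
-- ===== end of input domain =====

-- B restructures the work: it collects the neighbour columns once and then scans the three
-- relevant rows (above / own / below) with early exits, instead of testing 8 guarded
-- neighbours for every digit cell; same return value, objective: alternative decomposition.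

-- ===== PORT A =====
-- matrix[r][c] with Python's negative-index wraparound (Pre_ keeps every access in range)
def pvCell (matrix : List (List String)) (r c : Int) : String :=
  (PySem.List.pyGet? ((PySem.List.pyGet? matrix r).getD []) c).getD ""

-- not ('0' <= cell <= '9' or cell == '.')  (Python string comparison = Lean's lexicographic ≤)
def pvSym (s : String) : Bool := !(decide (("0" ≤ s ∧ s ≤ "9") ∨ s = "."))

-- the body of A's `for i in indexes` loop, guard for guard
def pvStepA (main_index : Int) (matrix : List (List String)) (is_part : Bool) (i : Int) : Bool :=
  let is_part :=
    if pvSym (pvCell matrix (main_index - 1) i) && decide (0 < main_index) then true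
    else if pvSym (pvCell matrix (main_index - 1) (i - 1)) && decide (0 < main_index) && decide (0 < i) then true
    else if pvSym (pvCell matrix main_index (i - 1)) && decide (0 < i) then true
    else is_part
  let is_part :=
    if decide (i < (((PySem.List.pyGet? matrix 0).getD []).length : Int) - 1) then
      if pvSym (pvCell matrix (main_index - 1) (i + 1)) && decide (0 < main_index) then true
      else if pvSym (pvCell matrix main_index (i + 1)) then true
      else is_part
    else is_part
  if decide (main_index < (matrix.length : Int) - 1) then
    let is_part :=
      if pvSym (pvCell matrix (main_index + 1) i) then true
      else if pvSym (pvCell matrix (main_index + 1) (i - 1)) && decide (0 < i) then true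
      else is_part
    if decide (i < (((PySem.List.pyGet? matrix 0).getD []).length : Int) - 1) then
      if pvSym (pvCell matrix (main_index + 1) (i + 1)) then true
      else is_part
    else is_part
  else is_part

def check_if_part (main_index : Int) (indexes : List Int) (matrix : List (List String)) : Bool :=
  indexes.foldl (pvStepA main_index matrix) false

-- ===== PORT B =====
-- one pass of B's column-collecting loop: appends to (around, beside)
def pvWindowAB (n_cols : Int) (ab : List Int × List Int) (i : Int) : List Int × List Int :=
  let around := ab.1 ++ [i]
  let ab2 := if decide (0 < i) then (around ++ [i - 1], ab.2 ++ [i - 1]) else (around, ab.2)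
  if decide (i < n_cols - 1) then (ab2.1 ++ [i + 1], ab2.2 ++ [i + 1]) else ab2

def check_if_part_alt (main_index : Int) (indexes : List Int) (matrix : List (List String)) : Bool :=
  if indexes = [] then false
  else
    let n_rows : Int := matrix.length
    let n_cols : Int := ((PySem.List.pyGet? matrix 0).getD []).length
    let ab := indexes.foldl (pvWindowAB n_cols) ([], [])
    if decide (0 < main_index) && ab.1.any (fun c => pvSym (pvCell matrix (main_index - 1) c)) then true
    else if ab.2.any (fun c => pvSym (pvCell matrix main_index c)) then true
    else decide (main_index < n_rows - 1) && ab.1.any (fun c => pvSym (pvCell matrix (main_index + 1) c))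

-- ===== PRECONDITION & SPEC =====
-- Pre_ = rectangular grid with every accessed row/column index in Python's valid (possibly
-- negative) range: exactly where A performs no out-of-range access.  It also excludes ragged
-- matrices and out-of-range main_index/i on which A happens to RETURN only because a symbol is
-- found before the offending access is evaluated (short-circuit luck) — B reads the same cells
-- in a different order and agrees there, but whether A returns at all is accidental.
def Pre_check_if_part (main_index : Int) (indexes : List Int) (matrix : List (List String)) : Prop :=
  indexes ≠ [] →
    (1 ≤ (matrix.length : Int) ∧
     1 - (matrix.length : Int) ≤ main_index ∧ main_index ≤ (matrix.length : Int) - 1 ∧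
     (∀ row ∈ matrix, (row.length : Int) = ((matrix.headI).length : Int)) ∧
     (∀ i ∈ indexes, 1 - ((matrix.headI).length : Int) ≤ i ∧ i ≤ ((matrix.headI).length : Int) - 1))
instance (main_index : Int) (indexes : List Int) (matrix : List (List String)) : Decidable (Pre_check_if_part main_index indexes matrix) := by unfold Pre_check_if_part; infer_instance

def pvWitness_check_if_part : Int × List Int × List (List String) := (0, [0], [["1"], ["*"]])

def Spec_check_if_part (main_index : Int) (indexes : List Int) (matrix : List (List String)) (out : Bool) : Prop := out = check_if_part_alt main_index indexes matrix
instance (main_index : Int) (indexes : List Int) (matrix : List (List String)) (out : Bool) : Decidable (Spec_check_if_part main_index indexes matrix out) := by unfold Spec_check_if_part; infer_instance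

-- ===== CLAIM (what is proved, stated in full; the proofs are below) =====
def Claim_equal_check_if_part : Prop := ∀ (main_index : Int) (indexes : List Int) (matrix : List (List String)), Dom_check_if_part main_index indexes matrix → Pre_check_if_part main_index indexes matrix → Spec_check_if_part main_index indexes matrix (check_if_part main_index indexes matrix)

-- ===== LEMMAS AND PROOFS =====

def pvWin (L : Int) (p : Int → Bool) (i : Int) : Bool :=
  p i || (decide (0 < i) && p (i - 1)) || (decide (i < L - 1) && p (i + 1))

def pvSide (L : Int) (p : Int → Bool) (i : Int) : Bool :=
  (decide (0 < i) && p (i - 1)) || (decide (i < L - 1) && p (i + 1))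

def pvHit (main_index : Int) (matrix : List (List String)) (i : Int) : Bool :=
  let L : Int := ((PySem.List.pyGet? matrix 0).getD []).length
  (decide (0 < main_index) && pvWin L (fun c => pvSym (pvCell matrix (main_index - 1) c)) i)
  || pvSide L (fun c => pvSym (pvCell matrix main_index c)) i
  || (decide (main_index < (matrix.length : Int) - 1) && pvWin L (fun c => pvSym (pvCell matrix (main_index + 1) c)) i)

lemma pvStepA_eq (main_index : Int) (matrix : List (List String)) (b : Bool) (i : Int) :
    pvStepA main_index matrix b i = (b || pvHit main_index matrix i) := by
  simp only [pvStepA, pvHit, pvWin, pvSide]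
  generalize pvSym (pvCell matrix (main_index - 1) i) = a1
  generalize pvSym (pvCell matrix (main_index - 1) (i - 1)) = a2
  generalize pvSym (pvCell matrix main_index (i - 1)) = a3
  generalize pvSym (pvCell matrix (main_index - 1) (i + 1)) = a4
  generalize pvSym (pvCell matrix main_index (i + 1)) = a5
  generalize pvSym (pvCell matrix (main_index + 1) i) = a6
  generalize pvSym (pvCell matrix (main_index + 1) (i - 1)) = a7
  generalize pvSym (pvCell matrix (main_index + 1) (i + 1)) = a8
  generalize decide (0 < main_index) = q1
  generalize decide (0 < i) = qi
  generalize decide (i < (((PySem.List.pyGet? matrix 0).getD []).length : Int) - 1) = ql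
  generalize decide (main_index < (matrix.length : Int) - 1) = qr
  revert b a1 a2 a3 a4 a5 a6 a7 a8 q1 qi ql qr
  decide

lemma pvFoldA_eq (main_index : Int) (matrix : List (List String)) :
    ∀ (l : List Int) (b : Bool),
      l.foldl (pvStepA main_index matrix) b = (b || l.any (pvHit main_index matrix)) := by
  intro l
  induction l with
  | nil => intro b; simp
  | cons a t ih =>
      intro b
      rw [List.foldl_cons, List.any_cons, ih, pvStepA_eq, Bool.or_assoc]

def pvFA (L : Int) (i : Int) : List Int :=
  [i] ++ (if decide (0 < i) then [i - 1] else []) ++ (if decide (i < L - 1) then [i + 1] else [])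

def pvFB (L : Int) (i : Int) : List Int :=
  (if decide (0 < i) then [i - 1] else []) ++ (if decide (i < L - 1) then [i + 1] else [])

lemma pvWindowAB_spec (L : Int) :
    ∀ (l : List Int) (A0 B0 : List Int),
      l.foldl (pvWindowAB L) (A0, B0) = (A0 ++ l.flatMap (pvFA L), B0 ++ l.flatMap (pvFB L)) := by
  intro l
  induction l with
  | nil => intro A0 B0; simp
  | cons a t ih =>
      intro A0 B0
      have hstep : pvWindowAB L (A0, B0) a = (A0 ++ pvFA L a, B0 ++ pvFB L a) := by
        simp only [pvWindowAB, pvFA, pvFB]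
        by_cases h1 : (0 : Int) < a <;> by_cases h2 : a < L - 1 <;>
          simp [h1, h2, List.append_assoc]
      simp only [List.foldl_cons, hstep, ih, List.flatMap_cons, List.append_assoc]

lemma pvFA_any (L : Int) (p : Int → Bool) (i : Int) : (pvFA L i).any p = pvWin L p i := by
  simp only [pvFA, pvWin]
  by_cases h1 : (0 : Int) < i <;> by_cases h2 : i < L - 1 <;>
    simp [h1, h2, Bool.or_assoc]

lemma pvFB_any (L : Int) (p : Int → Bool) (i : Int) : (pvFB L i).any p = pvSide L p i := by
  simp only [pvFB, pvSide]
  by_cases h1 : (0 : Int) < i <;> by_cases h2 : i < L - 1 <;>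
    simp [h1, h2]

lemma pv_any_three (l : List Int) (c1 c2 : Bool) (f g h : Int → Bool) :
    l.any (fun i => c1 && f i || g i || c2 && h i) = (c1 && l.any f || l.any g || c2 && l.any h) := by
  induction l with
  | nil => simp
  | cons a t ih =>
      simp only [List.any_cons, ih]
      cases c1 <;> cases c2 <;> cases f a <;> cases g a <;> cases h a <;>
        cases t.any f <;> cases t.any g <;> cases t.any h <;> rfl

lemma pvHit_any (main_index : Int) (matrix : List (List String)) (l : List Int) :
    l.any (pvHit main_index matrix) =
      (decide (0 < main_index) &&
          l.any (pvWin (((PySem.List.pyGet? matrix 0).getD []).length : Int)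
            (fun c => pvSym (pvCell matrix (main_index - 1) c)))
        || l.any (pvSide (((PySem.List.pyGet? matrix 0).getD []).length : Int)
            (fun c => pvSym (pvCell matrix main_index c)))
        || decide (main_index < (matrix.length : Int) - 1) &&
          l.any (pvWin (((PySem.List.pyGet? matrix 0).getD []).length : Int)
            (fun c => pvSym (pvCell matrix (main_index + 1) c)))) :=
  pv_any_three l (decide (0 < main_index)) (decide (main_index < (matrix.length : Int) - 1))
    (pvWin (((PySem.List.pyGet? matrix 0).getD []).length : Int)
      (fun c => pvSym (pvCell matrix (main_index - 1) c)))
    (pvSide (((PySem.List.pyGet? matrix 0).getD []).length : Int)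
      (fun c => pvSym (pvCell matrix main_index c)))
    (pvWin (((PySem.List.pyGet? matrix 0).getD []).length : Int)
      (fun c => pvSym (pvCell matrix (main_index + 1) c)))

-- B, rewritten as the same per-index disjunction A folds to
lemma pvB_eq (main_index : Int) (indexes : List Int) (matrix : List (List String)) :
    check_if_part_alt main_index indexes matrix = indexes.any (pvHit main_index matrix) := by
  by_cases hne : indexes = []
  · simp [check_if_part_alt, hne]
  · simp only [check_if_part_alt, if_neg hne]
    rw [pvWindowAB_spec]
    simp only [List.nil_append, List.any_flatMap, pvFA_any, pvFB_any]
    rw [pvHit_any]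
    cases hq : (decide (0 < main_index) &&
        indexes.any (pvWin (((PySem.List.pyGet? matrix 0).getD []).length : Int)
          (fun c => pvSym (pvCell matrix (main_index - 1) c)))) <;>
      cases indexes.any (pvSide (((PySem.List.pyGet? matrix 0).getD []).length : Int)
          (fun c => pvSym (pvCell matrix main_index c))) <;>
      simp

-- ===== VERDICT (by name: the statement is the Claim_ definition above) =====
theorem check_if_part_spec : Claim_equal_check_if_part := by
  intro main_index indexes matrix _ _
  unfold Spec_check_if_part
  rw [check_if_part, pvFoldA_eq, pvB_eq]
  simp
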